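-- pv_equiv track=rewrite | github.com/monaxue/WEIRD-GPT | pickle_data.py | sub_numb
-- ===== SOURCE A (Python) =====
-- def sub_numb(answer):
--     period_ind = answer[:5].find('.')
--     colon_ind = answer[:5].find(':')
--     dash_ind = answer[:5].find('-')
--     first_ind = min((ind for ind in [period_ind, colon_ind, dash_ind] if ind != -1), default=-1)
--
--     if first_ind == -1:  # period, colon, and dash not found in the first 5 characters
--         return 'na'
--     else:
--         return answer[:first_ind].strip()
-- ===== SOURCE B (Python) =====
-- def sub_numb(answer):
--     for i, ch in enumerate(answer[:5]):
--         if ch in '.:-':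
--             return answer[:i].strip()
--     return 'na'
-- ===== Notes on version B (the rewrite author's own statement) =====
-- stated objective: simpler
-- what changed: Replaces A's three separate .find scans over answer[:5] plus a filtered min-reduction with a single early-exiting left-to-right scan that returns at the first delimiter.
import Mathlib
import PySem

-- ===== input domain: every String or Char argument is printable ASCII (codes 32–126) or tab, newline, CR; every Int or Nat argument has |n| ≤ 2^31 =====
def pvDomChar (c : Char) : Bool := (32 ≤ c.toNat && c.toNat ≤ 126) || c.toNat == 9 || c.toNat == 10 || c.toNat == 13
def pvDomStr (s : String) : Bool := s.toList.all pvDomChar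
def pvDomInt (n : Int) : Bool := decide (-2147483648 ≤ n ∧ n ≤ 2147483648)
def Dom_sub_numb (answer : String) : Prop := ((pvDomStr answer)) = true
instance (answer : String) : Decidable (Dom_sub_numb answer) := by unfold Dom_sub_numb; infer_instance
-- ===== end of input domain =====

-- B replaces A's three separate find scans over answer[:5] plus a filtered min-reduction
-- with one early-exiting left-to-right scan that returns at the first delimiter (simpler).


-- ===== PORT A =====
def sub_numb (answer : String) : String :=
  let period_ind := PySem.Str.find (PySem.Str.slice answer none (some 5)) "."
  let colon_ind := PySem.Str.find (PySem.Str.slice answer none (some 5)) ":"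
  let dash_ind := PySem.Str.find (PySem.Str.slice answer none (some 5)) "-"
  let first_ind :=
    (PySem.List.min? (([period_ind, colon_ind, dash_ind]).filter (fun ind => ind != -1)) id).getD (-1)
  if first_ind = -1 then "na"
  else PySem.Str.strip (PySem.Str.slice answer none (some first_ind))

-- ===== PORT B =====
-- the for-loop of Source B: scan the enumerated prefix, return at the first delimiter
def subNumbGo (answer : String) : List (Int × Char) → String
  | [] => "na"
  | (i, ch) :: rest =>
    if PySem.Str.isIn (String.ofList [ch]) ".:-" then
      PySem.Str.strip (PySem.Str.slice answer none (some i))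
    else subNumbGo answer rest

def sub_numb_alt (answer : String) : String :=
  subNumbGo answer (PySem.List.enumerate (PySem.Str.slice answer none (some 5)).toList)

-- ===== PRECONDITION & SPEC =====
def Spec_sub_numb (answer : String) (out : String) : Prop := out = sub_numb_alt answer
instance (answer : String) (out : String) : Decidable (Spec_sub_numb answer out) := by unfold Spec_sub_numb; infer_instance

-- ===== CLAIM (what is proved, stated in full; the proofs are below) =====
def Claim_equal_sub_numb : Prop := ∀ (answer : String), Dom_sub_numb answer → Spec_sub_numb answer (sub_numb answer)

-- ===== LEMMAS AND PROOFS =====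

-- [a] is an infix of l iff a is a member of l
theorem pv_singleton_infix {α : Type} (a : α) (l : List α) : [a] <:+: l ↔ a ∈ l := by
  constructor
  · intro h
    exact List.singleton_sublist.mp h.sublist
  · intro h
    obtain ⟨s, t, rfl⟩ := List.append_of_mem h
    exact ⟨s, t, by simp⟩

-- [a] is a prefix of l iff l's head is a
theorem pv_singleton_prefix {α : Type} (a : α) (l : List α) : [a] <+: l ↔ l.head? = some a := by
  cases l with
  | nil => simp
  | cons x xs => simp [List.cons_prefix_cons, eq_comm]

-- Chars.find for a single-character needle is the first index of that character
theorem pv_find_singleton (t : List Char) (c : Char) :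
    PySem.Chars.find t [c] = (t.findIdx? (· == c)).elim (-1) (fun n => (n : Int)) := by
  rcases h : t.findIdx? (· == c) with _ | n
  · have hmem : c ∉ t := by
      intro hc
      have := List.findIdx?_eq_none_iff.mp h c hc
      simp at this
    have : ¬ [c] <:+: t := fun hin => hmem ((pv_singleton_infix c t).mp hin)
    simpa using (PySem.Chars.find_eq_neg_one_iff t [c]).mpr this
  · obtain ⟨hn, hpn, hminn⟩ := List.findIdx?_eq_some_iff_getElem.mp h
    simp at hpn
    have hgetn : t[n]? = some c := by simp [List.getElem?_eq_getElem hn, hpn]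
    have hmem : c ∈ t := hpn ▸ List.getElem_mem hn
    have hpos : 0 ≤ PySem.Chars.find t [c] :=
      (PySem.Chars.find_nonneg_iff t [c]).mpr ((pv_singleton_infix c t).mpr hmem)
    obtain ⟨hpre, hmin⟩ := PySem.Chars.find_spec hpos
    set m := (PySem.Chars.find t [c]).toNat with hm
    have hgetm : (t.drop m).head? = some c := (pv_singleton_prefix c (t.drop m)).mp hpre
    rw [List.head?_drop] at hgetm
    have h1 : ¬ n < m := fun hlt =>
      hmin n hlt ((pv_singleton_prefix c (t.drop n)).mpr (by rw [List.head?_drop]; exact hgetn))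
    have h2 : ¬ m < n := by
      intro hlt
      have hmlen : m < t.length := Nat.lt_trans hlt hn
      have := hminn m hlt
      rw [List.getElem?_eq_getElem hmlen] at hgetm
      simp at hgetm
      simp [hgetm] at this
    have hmn : m = n := by omega
    simp [← hmn, hm]
    omega

-- minimum combination of two optional first-indices
def pvOmin : Option Nat → Option Nat → Option Nat
  | none, b => b
  | some a, none => some a
  | some a, some b => some (min a b)

-- first index where p or q holds = min of the two first indices
theorem pv_findIdx?_or (p q : Char → Bool) (t : List Char) :
    t.findIdx? (fun c => p c || q c) = pvOmin (t.findIdx? p) (t.findIdx? q) := by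
  induction t with
  | nil => simp [pvOmin]
  | cons a t ih =>
    by_cases hp : p a <;> by_cases hq : q a <;>
      simp [List.findIdx?_cons, hp, hq, ih, pvOmin]
    · rcases t.findIdx? q with _ | n <;> simp
    · rcases t.findIdx? p with _ | n <;> simp
    · rcases t.findIdx? p with _ | n₁ <;> rcases t.findIdx? q with _ | n₂ <;> simp

-- A's filtered min-with-default over the three find results, in terms of pvOmin
theorem pv_min_three (o₁ o₂ o₃ : Option Nat) :
    (PySem.List.min?
      (([o₁.elim (-1) (fun n => (n : Int)), o₂.elim (-1) (fun n => (n : Int)),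
         o₃.elim (-1) (fun n => (n : Int))]).filter (fun ind => ind != -1)) id).getD (-1)
    = (pvOmin o₁ (pvOmin o₂ o₃)).elim (-1) (fun n => (n : Int)) := by
  have hne : ∀ n : Nat, (((n : Int)) != -1) = true := by intro n; simp [bne]
  rcases o₁ with _ | n₁ <;> rcases o₂ with _ | n₂ <;> rcases o₃ with _ | n₃ <;>
    simp [PySem.List.min?, List.filter, hne, pvOmin, List.foldl] <;>
    repeat' (first | omega | (split_ifs <;> simp_all))

-- membership of a single char in the delimiter string ".:-"
theorem pv_isIn_delim (c : Char) :
    PySem.Str.isIn (String.ofList [c]) ".:-" = (c == '.' || (c == ':' || c == '-')) := by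
  have h0 : (String.ofList [c]).toList = [c] := String.toList_ofList
  rw [show PySem.Str.isIn (String.ofList [c]) ".:-" = PySem.Chars.isIn [c] ['.', ':', '-'] from by
    simp [PySem.Str.isIn_eq, h0]]
  rw [Bool.eq_iff_iff, PySem.Chars.isIn_iff_infix, pv_singleton_infix]
  simp

-- B's scan over an enumerated list, characterized by findIdx?
theorem pv_scan_eq (ans : String) (t : List Char) (k : Int) :
    subNumbGo ans (PySem.List.enumerate t k)
    = (t.findIdx? (fun c => c == '.' || (c == ':' || c == '-'))).elim "na"
        (fun n => PySem.Str.strip (PySem.Str.slice ans none (some (k + n)))) := by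
  induction t generalizing k with
  | nil => simp [PySem.List.enumerate, subNumbGo]
  | cons a t ih =>
    rw [show PySem.List.enumerate (a :: t) k = (k, a) :: PySem.List.enumerate t (k + 1) from rfl]
    by_cases h : (a == '.' || (a == ':' || a == '-')) = true
    · rw [subNumbGo, pv_isIn_delim, if_pos h]
      simp [List.findIdx?_cons, h]
    · rw [subNumbGo, pv_isIn_delim, if_neg (by simp_all), ih]
      rw [List.findIdx?_cons, if_neg h]
      rcases t.findIdx? (fun c => c == '.' || (c == ':' || c == '-')) with _ | n <;> simp
      ring_nf

-- ===== VERDICT (by name: the statement is the Claim_ definition above) =====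
theorem sub_numb_spec : Claim_equal_sub_numb := by
  intro answer _
  unfold Spec_sub_numb sub_numb sub_numb_alt
  dsimp only
  set t := (PySem.Str.slice answer none (some 5)).toList with ht
  rw [pv_scan_eq]
  have hfind : ∀ c : Char, PySem.Str.find (PySem.Str.slice answer none (some 5)) (String.ofList [c])
      = (t.findIdx? (· == c)).elim (-1) (fun n => (n : Int)) := by
    intro c
    rw [show PySem.Str.find (PySem.Str.slice answer none (some 5)) (String.ofList [c])
        = PySem.Chars.find t [c] from by simp [PySem.Str.find_eq, ht, String.toList_ofList]]
    exact pv_find_singleton t c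
  rw [show ("." : String) = String.ofList ['.'] from rfl, show (":" : String) = String.ofList [':'] from rfl,
      show ("-" : String) = String.ofList ['-'] from rfl]
  rw [hfind, hfind, hfind, pv_min_three]
  rw [pv_findIdx?_or (fun c => c == '.') (fun c => c == ':' || c == '-'),
      pv_findIdx?_or (fun c => c == ':') (fun c => c == '-')]
  rcases pvOmin (t.findIdx? (· == '.')) (pvOmin (t.findIdx? (· == ':')) (t.findIdx? (· == '-'))) with _ | n
  · simp
  · simp
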